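-- pv_equiv track=rewrite | github.com/My-Game-Manage/NKScraper | src/utils/helpers.py | filter_race_ids_by_number
-- ===== SOURCE A (Python) =====
-- def filter_race_ids_by_number(race_ids: list, target_nums: list) -> list:
--     """
--     レースIDリストの中から、指定したレース番号に合致するものだけを抽出する
--
--     Args:
--         race_ids (list): ['202654032801', '202654032802', ...] のようなIDリスト
--         target_nums (list): [1, 11] のような取得したいレース番号のリスト
--
--     Returns:
--         list: フィルタリングされたレースIDリスト
--     """
--     if not race_ids:
--         return []
--
--     # 比較用にターゲット番号を文字列の2桁ゼロ埋めに変換しておく (1 -> "01")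
--     target_str_list = [str(n).zfill(2) for n in target_nums]
--
--     # 末尾2桁がターゲットに含まれるものだけを抽出
--     filtered = [
--         rid for rid in race_ids
--         if str(rid)[-2:] in target_str_list
--     ]
--
--     return sorted(filtered)
-- ===== SOURCE B (Python) =====
-- def filter_race_ids_by_number(race_ids: list, target_nums: list) -> list:
--     if not race_ids:
--         return []
--     # one pass: bucket the IDs by their last-two-character suffix
--     index = {}
--     for rid in race_ids:
--         index.setdefault(str(rid)[-2:], []).append(rid)
--     result = []
--     # ordered dedup of target suffixes so duplicate target_nums emit each ID once
--     for suffix in dict.fromkeys(str(n).zfill(2) for n in target_nums):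
--         result.extend(index.get(suffix, []))
--     return sorted(result)
-- ===== Notes on version B (the rewrite author's own statement) =====
-- stated objective: faster
-- what changed: Replaces the per-ID membership scan of the target-suffix list by a one-pass suffix->IDs bucket index plus one lookup per de-duplicated target suffix.
import Mathlib
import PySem

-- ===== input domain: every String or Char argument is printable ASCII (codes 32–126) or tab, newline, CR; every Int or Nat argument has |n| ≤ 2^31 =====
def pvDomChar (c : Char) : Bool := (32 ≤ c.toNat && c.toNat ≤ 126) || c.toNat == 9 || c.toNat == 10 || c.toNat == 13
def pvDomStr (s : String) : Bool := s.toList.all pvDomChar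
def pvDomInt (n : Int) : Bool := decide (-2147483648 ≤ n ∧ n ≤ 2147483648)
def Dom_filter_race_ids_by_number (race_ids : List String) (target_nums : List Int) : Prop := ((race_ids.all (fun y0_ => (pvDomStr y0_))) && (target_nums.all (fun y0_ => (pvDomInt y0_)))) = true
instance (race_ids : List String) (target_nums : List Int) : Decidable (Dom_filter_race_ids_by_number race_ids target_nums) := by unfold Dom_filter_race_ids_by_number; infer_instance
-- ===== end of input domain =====

-- B replaces A's per-ID scan of the target-suffix list by a one-pass suffix→IDs bucket index
-- plus one lookup per de-duplicated target suffix (objective: faster).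

-- hand port of Python str.zfill(width) for width = 2, exact: pad with '0' on the left,
-- after a leading sign character if present
def pvZfill2 (cs : List Char) : List Char :=
  if 2 ≤ cs.length then cs
  else match cs with
    | [] => ['0', '0']
    | c :: rest =>
      if c = '-' ∨ c = '+' then c :: List.replicate (2 - cs.length) '0' ++ rest
      else List.replicate (2 - cs.length) '0' ++ (c :: rest)

-- str(rid)[-2:] (rid is already a str)
def pvSuffix2 (s : String) : List Char :=
  PySem.List.slice s.toList (some (-2)) none

-- ===== PORT A =====
def filter_race_ids_by_number (race_ids : List String) (target_nums : List Int) : List String :=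
  if race_ids = [] then []
  else
    let target_str_list : List (List Char) := target_nums.map (fun n => pvZfill2 (PySem.Int.toChars n))
    let filtered := race_ids.filter (fun rid => target_str_list.contains (pvSuffix2 rid))
    PySem.List.sorted filtered (fun x => x) false

-- ===== PORT B =====
def filter_race_ids_by_number_alt (race_ids : List String) (target_nums : List Int) : List String :=
  if race_ids = [] then []
  else
    -- index.setdefault(str(rid)[-2:], []).append(rid)
    let index : PySem.Dict (List Char) (List String) :=
      race_ids.foldl (fun d rid => PySem.Dict.modify d (pvSuffix2 rid) [] (fun v => v ++ [rid])) PySem.Dict.empty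
    -- for suffix in dict.fromkeys(...): result.extend(index.get(suffix, []))
    let result := (PySem.List.dedup (target_nums.map (fun n => pvZfill2 (PySem.Int.toChars n)))).foldl
      (fun acc suf => acc ++ PySem.Dict.getD index suf []) []
    PySem.List.sorted result (fun x => x) false

-- ===== PRECONDITION & SPEC =====
def Spec_filter_race_ids_by_number (race_ids : List String) (target_nums : List Int) (out : List String) : Prop := out = filter_race_ids_by_number_alt race_ids target_nums
instance (race_ids : List String) (target_nums : List Int) (out : List String) : Decidable (Spec_filter_race_ids_by_number race_ids target_nums out) := by unfold Spec_filter_race_ids_by_number; infer_instance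

-- ===== CLAIM (what is proved, stated in full; the proofs are below) =====
def Claim_equal_filter_race_ids_by_number : Prop := ∀ (race_ids : List String) (target_nums : List Int), Dom_filter_race_ids_by_number race_ids target_nums → Spec_filter_race_ids_by_number race_ids target_nums (filter_race_ids_by_number race_ids target_nums)

-- ===== LEMMAS AND PROOFS =====

-- the bucket index maps each suffix k to exactly the IDs of l whose suffix is k, in order
lemma getD_buildIndex (l : List String) (d : PySem.Dict (List Char) (List String)) (k : List Char) :
    PySem.Dict.getD (l.foldl (fun d rid => PySem.Dict.modify d (pvSuffix2 rid) [] (fun v => v ++ [rid])) d) k []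
      = PySem.Dict.getD d k [] ++ l.filter (fun rid => pvSuffix2 rid == k) := by
  induction l generalizing d with
  | nil => simp
  | cons x l ih =>
    simp only [List.foldl_cons, ih, List.filter_cons]
    rw [PySem.Dict.getD_modify]
    by_cases h : pvSuffix2 x = k
    · simp [h]
    · simp [h, Ne.symm h, beq_iff_eq]

-- disjoint tests split a filter into an append, up to permutation
lemma filter_or_perm {α : Type} (p q : α → Bool) (l : List α)
    (hdisj : ∀ x, p x = true → q x = false) :
    (l.filter (fun x => p x || q x)).Perm (l.filter p ++ l.filter q) := by
  induction l with
  | nil => simp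
  | cons a l ih =>
    by_cases hp : p a = true
    · simp only [List.filter_cons, hp, hdisj a hp, Bool.true_or, if_true, List.cons_append]
      exact ih.cons a
    · simp only [Bool.not_eq_true] at hp
      by_cases hq : q a = true
      · simp only [List.filter_cons, hp, hq, Bool.false_or, if_true]
        exact (ih.cons a).trans (List.perm_middle).symm
      · simp only [Bool.not_eq_true] at hq
        simpa [List.filter_cons, hp, hq] using ih  -- both tests false

-- concatenating the buckets of a duplicate-free suffix list permutes the membership filter
lemma flatMap_buckets_perm (ks : List (List Char)) (hks : ks.Nodup) (l : List String) :
    (ks.flatMap (fun k => l.filter (fun rid => pvSuffix2 rid == k))).Perm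
      (l.filter (fun rid => ks.contains (pvSuffix2 rid))) := by
  induction ks with
  | nil => simp
  | cons k ks ih =>
    rcases List.nodup_cons.mp hks with ⟨hk, hnd⟩
    have hdisj : ∀ x : String, (pvSuffix2 x == k) = true → ks.contains (pvSuffix2 x) = false := by
      intro x hx
      have : pvSuffix2 x = k := by simpa [beq_iff_eq] using hx
      subst this
      simp [hk]
    rw [List.flatMap_cons,
      show l.filter (fun rid => (k :: ks).contains (pvSuffix2 rid))
          = l.filter (fun rid => (pvSuffix2 rid == k) || ks.contains (pvSuffix2 rid)) from by
        simp [Bool.beq_eq_decide_eq]]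
    exact (List.Perm.append_left _ (ih hnd)).trans (filter_or_perm _ _ l hdisj).symm

-- ===== VERDICT (by name: the statement is the Claim_ definition above) =====
theorem filter_race_ids_by_number_spec : Claim_equal_filter_race_ids_by_number := by
  intro race_ids target_nums _
  unfold Spec_filter_race_ids_by_number filter_race_ids_by_number filter_race_ids_by_number_alt
  by_cases h : race_ids = []
  · simp [h]
  · simp only [h, if_false]
    apply PySem.List.sorted_eq_sorted_of_perm _ _ _ (fun _ _ hxy => hxy)
    set T := target_nums.map (fun n => pvZfill2 (PySem.Int.toChars n)) with hT
    have hres : (PySem.List.dedup T).foldl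
        (fun acc suf => acc ++ PySem.Dict.getD
          (race_ids.foldl (fun d rid => PySem.Dict.modify d (pvSuffix2 rid) [] (fun v => v ++ [rid])) PySem.Dict.empty) suf []) []
        = (PySem.List.dedup T).flatMap (fun suf => race_ids.filter (fun rid => pvSuffix2 rid == suf)) := by
      rw [PySem.List.foldl_append_eq_flatMap]
      simp only [List.nil_append]
      apply List.flatMap_congr
      intro suf _
      rw [getD_buildIndex]
      simp
    rw [hres]
    have hperm := flatMap_buckets_perm (PySem.List.dedup T) (by simpa using PySem.List.nodup_dedup T) race_ids
    have hcont : ∀ rid : String, (PySem.List.dedup T).contains (pvSuffix2 rid) = T.contains (pvSuffix2 rid) := by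
      intro rid
      simp [PySem.List.dedup_eq_ofList, PySem.Set.mem_ofList]
    refine (List.Perm.symm ?_).trans hperm.symm
    rw [List.filter_congr (fun x _ => hcont x)]
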